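-- pv_equiv track=rewrite | github.com/laurentbeaughon/aoc2021 | src/day_8.py | part_1
-- ===== SOURCE A (Python) =====
-- def part_1(data):
--     cpt = 0
--     for line in data:
--         dig_1 = sum([len(code) == 2 for code in line[1]])
--         dig_4 = sum([len(code) == 4 for code in line[1]])
--         dig_7 = sum([len(code) == 3 for code in line[1]])
--         dig_8 = sum([len(code) == 7 for code in line[1]])
--         cpt += dig_1 + dig_4 + dig_7 + dig_8
--     return cpt
-- ===== SOURCE B (Python) =====
-- def part_1(data):
--     # Build one histogram of code lengths over the whole input, then read
--     # off the four unique-length buckets (1->2, 7->3, 4->4, 8->7 segments).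
--     hist = {}
--     for line in data:
--         for code in line[1]:
--             n = len(code)
--             hist[n] = hist.get(n, 0) + 1
--     return hist.get(2, 0) + hist.get(3, 0) + hist.get(4, 0) + hist.get(7, 0)
-- ===== Notes on version B (the rewrite author's own statement) =====
-- stated objective: alternative
-- what changed: Instead of four per-line indicator sums accumulated into a counter, B builds a single global frequency table (dict) of code lengths over the whole input and returns the sum of the four buckets 2, 3, 4 and 7 at the end; correct because those four lengths each identify a unique digit, so bucket totals equal A's filtered counts.
import Mathlib
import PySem

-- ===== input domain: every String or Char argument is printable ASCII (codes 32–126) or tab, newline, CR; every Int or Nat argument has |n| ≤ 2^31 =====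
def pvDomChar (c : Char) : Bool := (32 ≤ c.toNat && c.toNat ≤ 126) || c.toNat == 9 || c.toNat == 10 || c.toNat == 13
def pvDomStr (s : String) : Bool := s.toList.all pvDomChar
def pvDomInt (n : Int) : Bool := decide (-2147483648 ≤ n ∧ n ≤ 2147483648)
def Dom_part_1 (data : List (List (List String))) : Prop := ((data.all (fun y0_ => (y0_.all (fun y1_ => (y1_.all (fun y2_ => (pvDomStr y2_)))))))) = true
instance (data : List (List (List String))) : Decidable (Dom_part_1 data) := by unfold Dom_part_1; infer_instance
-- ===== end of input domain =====

-- B replaces the per-line filtered sums with one global length-histogram (dict) read at the end; same return value.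

-- ===== PORT A =====
def part_1 (data : List (List (List String))) : Int :=
  data.foldl (fun cpt line =>
    let l1 := (PySem.List.pyGet? line 1).getD []
    let dig_1 := (l1.map (fun code => if PySem.Str.len code = 2 then (1 : Int) else 0)).sum
    let dig_4 := (l1.map (fun code => if PySem.Str.len code = 4 then (1 : Int) else 0)).sum
    let dig_7 := (l1.map (fun code => if PySem.Str.len code = 3 then (1 : Int) else 0)).sum
    let dig_8 := (l1.map (fun code => if PySem.Str.len code = 7 then (1 : Int) else 0)).sum
    cpt + (dig_1 + dig_4 + dig_7 + dig_8)) 0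

-- ===== PORT B =====
-- B: build one frequency table of code lengths over the whole input, then read the four buckets.
def part_1_alt (data : List (List (List String))) : Int :=
  let hist : PySem.Dict Int Int :=
    data.foldl (fun h line =>
      ((PySem.List.pyGet? line 1).getD []).foldl
        (fun h code => h.insert (PySem.Str.len code) (h.getD (PySem.Str.len code) 0 + 1)) h)
      PySem.Dict.empty
  hist.getD 2 0 + hist.getD 3 0 + hist.getD 4 0 + hist.getD 7 0

-- ===== PRECONDITION & SPEC =====
-- Pre_ excludes exactly the inputs where some line has fewer than two entries, on which A raises IndexError at line[1]
def Pre_part_1 (data : List (List (List String))) : Prop := ∀ line ∈ data, 2 ≤ line.length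
instance (data : List (List (List String))) : Decidable (Pre_part_1 data) := by unfold Pre_part_1; infer_instance
def pvWitness_part_1 : List (List (List String)) := [[["ab"], ["ab", "abc", "abcdefg", "a"]]]
def Spec_part_1 (data : List (List (List String))) (out : Int) : Prop := out = part_1_alt data
instance (data : List (List (List String))) (out : Int) : Decidable (Spec_part_1 data out) := by unfold Spec_part_1; infer_instance

-- ===== CLAIM =====
def Claim_equal_part_1 : Prop := ∀ (data : List (List (List String))), Dom_part_1 data → Pre_part_1 data → Spec_part_1 data (part_1 data)

-- ===== LEMMAS AND PROOFS =====
-- the four buckets read from a histogram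
def pvF (h : PySem.Dict Int Int) : Int := h.getD 2 0 + h.getD 3 0 + h.getD 4 0 + h.getD 7 0

theorem pv_foldl_add {α : Type} (f : α → Int) (l : List α) (a : Int) :
    l.foldl (fun s c => s + f c) a = a + (l.map f).sum := by
  induction l generalizing a with
  | nil => simp
  | cons x xs ih => simp [List.foldl, ih]; ring

-- an indicator sum is a count of lengths
theorem pv_indicator_count (l : List String) (k : Int) :
    (l.map (fun code => if PySem.Str.len code = k then (1 : Int) else 0)).sum
      = ((l.map PySem.Str.len).count k : Int) := by
  induction l with
  | nil => simp
  | cons x xs ih =>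
    simp only [List.map_cons, List.sum_cons, List.count_cons, beq_iff_eq, ih]
    push_cast
    ring

-- folding one line's codes into the histogram adds its four bucket counts
theorem pv_line_fold (l : List String) (h : PySem.Dict Int Int) :
    pvF (l.foldl (fun h code =>
        h.insert (PySem.Str.len code) (h.getD (PySem.Str.len code) 0 + 1)) h)
      = pvF h + ((l.map PySem.Str.len).count 2 + (l.map PySem.Str.len).count 3
          + (l.map PySem.Str.len).count 4 + (l.map PySem.Str.len).count 7 : Int) := by
  have e : l.foldl (fun h code =>
        h.insert (PySem.Str.len code) (h.getD (PySem.Str.len code) 0 + 1)) h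
      = (l.map PySem.Str.len).foldl (fun h n => h.insert n (h.getD n 0 + 1)) h := by
    rw [List.foldl_map]
  rw [e]
  unfold pvF
  rw [PySem.Dict.getD_foldl_insert_add_one, PySem.Dict.getD_foldl_insert_add_one,
    PySem.Dict.getD_foldl_insert_add_one, PySem.Dict.getD_foldl_insert_add_one]
  ring_nf

-- the whole histogram fold accumulates the per-line bucket counts
theorem pv_data_fold (data : List (List (List String))) (h : PySem.Dict Int Int) :
    pvF (data.foldl (fun h line =>
        ((PySem.List.pyGet? line 1).getD []).foldl
          (fun h code => h.insert (PySem.Str.len code) (h.getD (PySem.Str.len code) 0 + 1)) h) h)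
      = pvF h + (data.map (fun line =>
          let L := ((PySem.List.pyGet? line 1).getD []).map PySem.Str.len
          (L.count 2 + L.count 3 + L.count 4 + L.count 7 : Int))).sum := by
  induction data generalizing h with
  | nil => simp
  | cons x xs ih =>
    simp only [List.foldl_cons, List.map_cons, List.sum_cons, ih, pv_line_fold]
    ring

-- ===== VERDICT =====
theorem part_1_spec : Claim_equal_part_1 := by
  intro data _ _
  unfold Spec_part_1 part_1 part_1_alt
  rw [pv_foldl_add (fun line =>
    let l1 := (PySem.List.pyGet? line 1).getD []
    ((l1.map (fun code => if PySem.Str.len code = 2 then (1 : Int) else 0)).sum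
      + (l1.map (fun code => if PySem.Str.len code = 4 then (1 : Int) else 0)).sum
      + (l1.map (fun code => if PySem.Str.len code = 3 then (1 : Int) else 0)).sum
      + (l1.map (fun code => if PySem.Str.len code = 7 then (1 : Int) else 0)).sum))]
  show (0 : Int) + _ = pvF _
  rw [pv_data_fold]
  simp only [pvF, PySem.Dict.getD_empty, pv_indicator_count]
  rw [zero_add, zero_add, zero_add, zero_add, zero_add]
  refine congrArg List.sum (List.map_congr_left ?_)
  intro line _
  ring
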